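-- pv_equiv track=rewrite | github.com/valenb02/primer-repo | flags.py | hay_meseta
-- ===== SOURCE A (Python) =====
-- def hay_meseta(lista: list[int]) -> bool:
--     meseta : bool = False
--     contador : int = 1
--     inicio_racha : int = 0
--     for i in range(1,len(lista)):
--         if lista[i] == lista[i-1]:
--             contador += 1
--         else:
--             if contador >= 3 and inicio_racha > 0:
--                 meseta = True   # preguntar cual es la diferencia a si hubiese puesto return True aca
--             contador = 1
--             inicio_racha = i
--
--     if contador >= 3 and inicio_racha > 0:
--         meseta = True
--     return meseta
-- ===== SOURCE B (Python) =====
-- def hay_meseta(lista: list[int]) -> bool: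
--     return any(
--         lista[i - 1] != lista[i] == lista[i + 1] == lista[i + 2]
--         for i in range(1, len(lista) - 2)
--     )
-- ===== Notes on version B (the rewrite author's own statement) =====
-- stated objective: alternative
-- what changed: Replaced A's stateful run-length counter/flag/run-start machine by a stateless sliding-window scan: a plateau of length >=3 not starting at index 0 exists iff some 4-window satisfies lista[i-1] != lista[i] == lista[i+1] == lista[i+2].
import Mathlib
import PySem

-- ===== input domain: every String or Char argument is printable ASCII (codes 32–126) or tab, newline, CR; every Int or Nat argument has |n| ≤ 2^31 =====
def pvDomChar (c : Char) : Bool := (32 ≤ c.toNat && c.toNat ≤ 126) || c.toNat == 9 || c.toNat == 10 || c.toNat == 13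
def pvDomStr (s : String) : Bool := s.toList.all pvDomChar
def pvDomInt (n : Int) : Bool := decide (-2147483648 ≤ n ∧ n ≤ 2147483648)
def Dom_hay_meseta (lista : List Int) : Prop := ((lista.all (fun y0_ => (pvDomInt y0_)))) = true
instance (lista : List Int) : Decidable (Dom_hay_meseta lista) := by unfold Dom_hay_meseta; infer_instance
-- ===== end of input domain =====

-- B replaces A's stateful counter/flag/run-start machine by a stateless 4-element
-- sliding-window scan (alternative algorithm, same O(n) cost).


-- ===== PORT A =====
-- loop body of A: state (meseta, contador, inicio_racha), index i
def pvStepA (lista : List Int) (st : Bool × Int × Int) (i : Int) : Bool × Int × Int :=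
  if PySem.List.pyGetD lista i 0 == PySem.List.pyGetD lista (i - 1) 0 then
    (st.1, st.2.1 + 1, st.2.2)
  else
    ((if 3 ≤ st.2.1 ∧ 0 < st.2.2 then true else st.1), 1, i)

def hay_meseta (lista : List Int) : Bool :=
  let st := (PySem.List.pyRange 1 (PySem.List.len lista) 1).foldl (pvStepA lista) (false, 1, 0)
  if 3 ≤ st.2.1 ∧ 0 < st.2.2 then true else st.1

-- ===== PORT B =====
-- 4-element window predicate at index i: lista[i-1] != lista[i] == lista[i+1] == lista[i+2]
def pvWinPred (lista : List Int) (i : Int) : Bool :=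
  (!(PySem.List.pyGetD lista (i - 1) 0 == PySem.List.pyGetD lista i 0))
    && (PySem.List.pyGetD lista i 0 == PySem.List.pyGetD lista (i + 1) 0)
    && (PySem.List.pyGetD lista (i + 1) 0 == PySem.List.pyGetD lista (i + 2) 0)

def hay_meseta_alt (lista : List Int) : Bool :=
  (PySem.List.pyRange 1 (PySem.List.len lista - 2) 1).any (pvWinPred lista)

-- ===== PRECONDITION & SPEC =====
def Spec_hay_meseta (lista : List Int) (out : Bool) : Prop := out = hay_meseta_alt lista
instance (lista : List Int) (out : Bool) : Decidable (Spec_hay_meseta lista out) := by unfold Spec_hay_meseta; infer_instance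

-- ===== CLAIM (what is proved, stated in full; the proofs are below) =====
def Claim_equal_hay_meseta : Prop := ∀ (lista : List Int), Dom_hay_meseta lista → Spec_hay_meseta lista (hay_meseta lista)

-- ===== LEMMAS AND PROOFS =====

-- proof-side helper: run lengths of maximal blocks of equal elements
def pvRunLens : List Int → List Nat
  | [] => []
  | x :: xs =>
      ((xs.takeWhile (· == x)).length + 1) :: pvRunLens (xs.dropWhile (· == x))
termination_by l => l.length
decreasing_by
  simp only [List.length_cons]
  exact Nat.lt_succ_of_le (xs.length_dropWhile_le _)

-- structural version of A's loop: prev element, remaining tail, next index, state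
def pvLoopA (prev : Int) : List Int → Int → Bool × Int × Int → Bool × Int × Int
  | [], _, st => st
  | y :: ys, i, st =>
      if y == prev then pvLoopA y ys (i + 1) (st.1, st.2.1 + 1, st.2.2)
      else pvLoopA y ys (i + 1) ((if 3 ≤ st.2.1 ∧ 0 < st.2.2 then true else st.1), 1, i)

def pvFin (st : Bool × Int × Int) : Bool :=
  if 3 ≤ st.2.1 ∧ 0 < st.2.2 then true else st.1

-- structural version of B's window scan: prev element, remaining tail
def pvWin : Int → List Int → Bool
  | _, [] => false
  | _, [_] => false
  | _, [_, _] => false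
  | prev, a :: b :: c :: t => ((!(prev == a)) && (a == b) && (b == c)) || pvWin a (b :: c :: t)

-- the index fold of A over pre ++ x :: t, starting at index pre.length + 1, is pvLoopA
theorem pvBridge (t : List Int) : ∀ (pre : List Int) (x : Int) (st : Bool × Int × Int),
    (PySem.List.pyRange ((pre.length : Int) + 1) (PySem.List.len (pre ++ x :: t)) 1).foldl
        (pvStepA (pre ++ x :: t)) st
      = pvLoopA x t ((pre.length : Int) + 1) st := by
  induction t with
  | nil =>
    intro pre x st
    rw [PySem.List.pyRange_one_eq_nil (by simp [PySem.List.len])]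
    rfl
  | cons y t' ih =>
    intro pre x st
    have hlt : (pre.length : Int) + 1 < PySem.List.len (pre ++ x :: y :: t') := by
      simp only [PySem.List.len, List.length_append, List.length_cons]
      push_cast; omega
    have hy : PySem.List.pyGetD (pre ++ x :: y :: t') ((pre.length : Int) + 1) 0 = y := by
      have h1 : ((pre.length : Int) + 1) = ((pre.length + 1 : Nat) : Int) := by push_cast; ring
      rw [h1, PySem.List.pyGetD_natCast]
      simp [List.getD]
    have hx : PySem.List.pyGetD (pre ++ x :: y :: t') ((pre.length : Int) + 1 - 1) 0 = x := by
      have h1 : ((pre.length : Int) + 1 - 1) = ((pre.length : Nat) : Int) := by ring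
      rw [h1, PySem.List.pyGetD_natCast]
      simp [List.getD]
    have hre : pre ++ x :: y :: t' = (pre ++ [x]) ++ y :: t' := by simp
    have hL : (((pre ++ [x]).length : Nat) : Int) = (pre.length : Int) + 1 := by simp
    rw [PySem.List.pyRange_one_cons hlt, List.foldl_cons]
    have hstep : pvStepA (pre ++ x :: y :: t') st ((pre.length : Int) + 1)
        = if y == x then (st.1, st.2.1 + 1, st.2.2)
          else ((if 3 ≤ st.2.1 ∧ 0 < st.2.2 then true else st.1), 1, (pre.length : Int) + 1) := by
      unfold pvStepA; rw [hy, hx]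
    rw [hstep]
    by_cases h : y = x
    · subst h
      rw [if_pos (beq_self_eq_true y)]
      rw [hre]
      have hih := ih (pre ++ [y]) y (st.1, st.2.1 + 1, st.2.2)
      rw [hL] at hih
      rw [hih]
      simp [pvLoopA]
    · have hne : (y == x) = false := by simp [h]
      rw [if_neg (by simp [hne])]
      rw [hre]
      have hih := ih (pre ++ [x]) y ((if 3 ≤ st.2.1 ∧ 0 < st.2.2 then true else st.1), 1, (pre.length : Int) + 1)
      rw [hL] at hih
      rw [hih]
      simp [pvLoopA, hne]

-- inside a later run (inicio_racha > 0): the current run counts, then all remaining runs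
theorem pvL2 (t : List Int) : ∀ (x i : Int) (m : Bool) (c r : Int), 1 ≤ i → 0 < r →
    pvFin (pvLoopA x t i (m, c, r))
      = (m || decide (3 ≤ c + ((t.takeWhile (· == x)).length : Int))
           || (pvRunLens (t.dropWhile (· == x))).any (fun l => decide (3 ≤ l))) := by
  induction t with
  | nil =>
    intro x i m c r _ hr
    simp only [pvLoopA, pvFin, List.takeWhile_nil, List.dropWhile_nil, List.length_nil,
      Nat.cast_zero, add_zero, pvRunLens, List.any_nil, Bool.or_false]
    split_ifs with hc
    · simp [hc.1]
    · have h3 : ¬ (3:Int) ≤ c := fun hcc => hc ⟨hcc, hr⟩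
      simp [h3]
  | cons y t' ih =>
    intro x i m c r hi hr
    by_cases h : y = x
    · subst h
      rw [show pvLoopA y (y :: t') i (m, c, r) = pvLoopA y t' (i + 1) (m, c + 1, r) from by
        simp [pvLoopA]]
      rw [ih y (i + 1) m (c + 1) r (by omega) hr]
      rw [show (y :: t').takeWhile (· == y) = y :: t'.takeWhile (· == y) from by
        simp]
      rw [show (y :: t').dropWhile (· == y) = t'.dropWhile (· == y) from by
        simp]
      have hdec : decide (3 ≤ c + 1 + ((t'.takeWhile (· == y)).length : Int))
          = decide (3 ≤ c + (((y :: t'.takeWhile (· == y)).length : Nat) : Int)) := by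
        rw [decide_eq_decide]; simp only [List.length_cons]; push_cast; omega
      rw [hdec]
    · have hne : (y == x) = false := by simp [h]
      rw [show pvLoopA x (y :: t') i (m, c, r)
            = pvLoopA y t' (i + 1) ((if 3 ≤ c ∧ 0 < r then true else m), 1, i) from by
        simp [pvLoopA, hne]]
      rw [ih y (i + 1) _ 1 i (by omega) (by omega)]
      have hm : (if 3 ≤ c ∧ 0 < r then true else m) = (m || decide (3 ≤ c)) := by
        split_ifs with hc
        · simp [hc.1]
        · have h3 : ¬ (3:Int) ≤ c := fun hcc => hc ⟨hcc, hr⟩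
          simp [h3]
      rw [hm]
      rw [show (y :: t').takeWhile (· == x) = [] from by simp [hne]]
      rw [show (y :: t').dropWhile (· == x) = y :: t' from by simp [hne]]
      simp only [pvRunLens, List.any_cons, List.length_nil, Nat.cast_zero, add_zero]
      have hdec : decide (3 ≤ (t'.takeWhile (· == y)).length + 1)
          = decide (3 ≤ (1:Int) + ((t'.takeWhile (· == y)).length : Int)) := by
        rw [decide_eq_decide]; push_cast; omega
      rw [hdec, Bool.or_assoc]

-- still inside the first run (inicio_racha = 0): only runs after the first count
theorem pvL1 (t : List Int) : ∀ (x i : Int) (m : Bool) (c : Int), 1 ≤ i →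
    pvFin (pvLoopA x t i (m, c, 0))
      = (m || (pvRunLens (t.dropWhile (· == x))).any (fun l => decide (3 ≤ l))) := by
  induction t with
  | nil =>
    intro x i m c _
    simp [pvLoopA, pvFin, pvRunLens]
  | cons y t' ih =>
    intro x i m c hi
    by_cases h : y = x
    · subst h
      rw [show pvLoopA y (y :: t') i (m, c, 0) = pvLoopA y t' (i + 1) (m, c + 1, 0) from by
        simp [pvLoopA]]
      rw [show (y :: t').dropWhile (· == y) = t'.dropWhile (· == y) from by
        simp]
      exact ih y (i + 1) m (c + 1) (by omega)
    · have hne : (y == x) = false := by simp [h]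
      rw [show pvLoopA x (y :: t') i (m, c, 0) = pvLoopA y t' (i + 1) (m, 1, i) from by
        simp [pvLoopA, hne]]
      rw [pvL2 t' y (i + 1) m 1 i (by omega) (by omega)]
      rw [show (y :: t').dropWhile (· == x) = y :: t' from by simp [hne]]
      simp only [pvRunLens, List.any_cons]
      have hdec : decide (3 ≤ (t'.takeWhile (· == y)).length + 1)
          = decide (3 ≤ (1:Int) + ((t'.takeWhile (· == y)).length : Int)) := by
        rw [decide_eq_decide]; push_cast; omega
      rw [hdec, Bool.or_assoc]

-- every run length is bounded by the list length
theorem pvRunLens_mem_le : ∀ (l : List Int), ∀ k ∈ pvRunLens l, k ≤ l.length := by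
  intro l
  induction l using pvRunLens.induct with
  | case1 => intro k hk; simp [pvRunLens] at hk
  | case2 x xs ih =>
    intro k hk
    rw [pvRunLens] at hk
    rcases List.mem_cons.mp hk with h | h
    · subst h
      have := (xs.takeWhile_sublist (· == x)).length_le
      simp only [List.length_cons]; omega
    · have h1 := ih k h
      have h2 := xs.length_dropWhile_le (· == x)
      simp only [List.length_cons]; omega

-- a list of length ≤ 2 has no run of length ≥ 3
theorem pvAny3_false (l : List Int) (h : l.length ≤ 2) :
    (pvRunLens l).any (fun k => decide (3 ≤ k)) = false := by
  rw [List.any_eq_false]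
  intro k hk
  have := pvRunLens_mem_le l k hk
  simp only [decide_eq_true_eq]
  omega

-- B's window scan equals the run-length criterion
theorem pvWinLem (t : List Int) : ∀ (x : Int),
    pvWin x t = (pvRunLens (t.dropWhile (· == x))).any (fun l => decide (3 ≤ l)) := by
  induction t with
  | nil => intro x; simp [pvWin, pvRunLens]
  | cons b t'' ih =>
    intro x
    match t'' with
    | [] =>
      rw [show pvWin x [b] = false from rfl]
      exact (pvAny3_false _ (by have := List.length_dropWhile_le (· == x) [b]; simp at this; omega)).symm
    | [c] =>
      rw [show pvWin x [b, c] = false from rfl]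
      exact (pvAny3_false _ (by have := List.length_dropWhile_le (· == x) [b, c]; simp at this; omega)).symm
    | c :: d :: t4 =>
      rw [show pvWin x (b :: c :: d :: t4)
            = (((!(x == b)) && (b == c) && (c == d)) || pvWin b (c :: d :: t4)) from rfl]
      rw [ih b]
      by_cases hbx : b = x
      · subst hbx
        rw [show (b :: c :: d :: t4).dropWhile (· == b) = (c :: d :: t4).dropWhile (· == b) from by
          simp]
        simp
      · have hne : (b == x) = false := by simp [hbx]
        have hne' : (x == b) = false := by simp [Ne.symm hbx]
        rw [show (b :: c :: d :: t4).dropWhile (· == x) = b :: c :: d :: t4 from by simp [hne]]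
        rw [pvRunLens]
        rw [List.any_cons]
        have hhead : decide (3 ≤ ((c :: d :: t4).takeWhile (· == b)).length + 1)
            = ((b == c) && (c == d)) := by
          by_cases hc : c = b
          · subst hc
            by_cases hd : d = c
            · subst hd
              simp [List.takeWhile]
            · have hdc : (d == c) = false := by simp [hd]
              simp [List.takeWhile, hdc, Ne.symm hd]
          · have hcb : (c == b) = false := by simp [hc]
            simp [List.takeWhile, hcb, Ne.symm hc]
        rw [hhead, hne']
        simp

-- the pyRange-any of B over pre ++ x :: t, starting at index pre.length + 1, is pvWin
theorem pvBridgeB (t : List Int) : ∀ (pre : List Int) (x : Int),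
    (PySem.List.pyRange ((pre.length : Int) + 1) (PySem.List.len (pre ++ x :: t) - 2) 1).any
        (pvWinPred (pre ++ x :: t))
      = pvWin x t := by
  induction t with
  | nil =>
    intro pre x
    rw [PySem.List.pyRange_one_eq_nil (by
      simp only [PySem.List.len, List.length_append, List.length_cons, List.length_nil]; push_cast; omega)]
    rfl
  | cons b t'' ih =>
    intro pre x
    match t'' with
    | [] =>
      rw [PySem.List.pyRange_one_eq_nil (by
        simp only [PySem.List.len, List.length_append, List.length_cons, List.length_nil]; push_cast; omega)]
      rfl
    | [c] =>
      rw [PySem.List.pyRange_one_eq_nil (by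
        simp only [PySem.List.len, List.length_append, List.length_cons, List.length_nil]; push_cast; omega)]
      rfl
    | c :: d :: t4 =>
      have hlt : (pre.length : Int) + 1 < PySem.List.len (pre ++ x :: b :: c :: d :: t4) - 2 := by
        simp only [PySem.List.len, List.length_append, List.length_cons]
        push_cast; omega
      rw [PySem.List.pyRange_one_cons hlt, List.any_cons]
      have hget : ∀ (k : Nat), PySem.List.pyGetD (pre ++ x :: b :: c :: d :: t4) ((pre.length + k : Nat) : Int) 0
          = (x :: b :: c :: d :: t4).getD k 0 := by
        intro k
        rw [PySem.List.pyGetD_natCast]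
        simp only [List.getD]
        rw [List.getElem?_append_right (Nat.le_add_right pre.length k)]
        simp
      have hpred : pvWinPred (pre ++ x :: b :: c :: d :: t4) ((pre.length : Int) + 1)
          = ((!(x == b)) && (b == c) && (c == d)) := by
        unfold pvWinPred
        have e1 : (pre.length : Int) + 1 - 1 = ((pre.length + 0 : Nat) : Int) := by push_cast; ring
        have e2 : (pre.length : Int) + 1 = ((pre.length + 1 : Nat) : Int) := by push_cast; ring
        have e3 : (pre.length : Int) + 1 + 1 = ((pre.length + 2 : Nat) : Int) := by push_cast; ring
        have e4 : (pre.length : Int) + 1 + 2 = ((pre.length + 3 : Nat) : Int) := by push_cast; ring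
        rw [e1, hget 0, e4, hget 3, e3, hget 2, e2, hget 1]
        rfl
      have hre : pre ++ x :: b :: c :: d :: t4 = (pre ++ [x]) ++ b :: c :: d :: t4 := by simp
      have hL : (((pre ++ [x]).length : Nat) : Int) = (pre.length : Int) + 1 := by simp
      rw [hpred]
      rw [hre]
      have hih := ih (pre ++ [x]) b
      rw [hL] at hih
      rw [hih]
      rfl

-- ===== VERDICT (by name: the statement is the Claim_ definition above) =====
theorem hay_meseta_spec : Claim_equal_hay_meseta := by
  intro lista _
  unfold Spec_hay_meseta hay_meseta hay_meseta_alt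
  cases lista with
  | nil =>
    decide
  | cons x t =>
    have hb := pvBridge t [] x (false, 1, 0)
    simp only [List.nil_append, List.length_nil, Nat.cast_zero, zero_add] at hb
    have hbB := pvBridgeB t [] x
    simp only [List.nil_append, List.length_nil, Nat.cast_zero, zero_add] at hbB
    show pvFin ((PySem.List.pyRange 1 (PySem.List.len (x :: t)) 1).foldl (pvStepA (x :: t)) (false, 1, 0)) = _
    rw [hb, pvL1 t x 1 false 1 (by omega), hbB, pvWinLem t x]
    simp
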